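-- pv_equiv track=rewrite | github.com/melpst/bitburner-cct | jump.py | maxLeapAtIndexRecur
-- ===== SOURCE A (Python) =====
-- def maxLeapAtIndexRecur(r):
--     if len(r)==1:
--         return 0
--     else:
--         index = maxLeapAtIndexRecur(r[1:])+1
--         if r[0]>=r[index]+index:
--             return 0
--         return index
-- ===== SOURCE B (Python) =====
-- def maxLeapAtIndexRecur(r):
--     g = 0
--     x = None
--     for v in reversed(r):
--         if x is None:
--             x = v
--         elif v >= x + g + 1:
--             g, x = 0, v
--         else:
--             g += 1
--     return g
-- ===== Notes on version B (the rewrite author's own statement) =====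
-- stated objective: faster
-- what changed: Replaced the recursion that slices a fresh list per call and re-indexes into it with a single right-to-left pass carrying (leap index, value it points at), so no slicing or indexed lookup remains.
-- outside the precondition, e.g. on maxLeapAtIndexRecur([]): A raises RecursionError, B returns 0
import Mathlib
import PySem

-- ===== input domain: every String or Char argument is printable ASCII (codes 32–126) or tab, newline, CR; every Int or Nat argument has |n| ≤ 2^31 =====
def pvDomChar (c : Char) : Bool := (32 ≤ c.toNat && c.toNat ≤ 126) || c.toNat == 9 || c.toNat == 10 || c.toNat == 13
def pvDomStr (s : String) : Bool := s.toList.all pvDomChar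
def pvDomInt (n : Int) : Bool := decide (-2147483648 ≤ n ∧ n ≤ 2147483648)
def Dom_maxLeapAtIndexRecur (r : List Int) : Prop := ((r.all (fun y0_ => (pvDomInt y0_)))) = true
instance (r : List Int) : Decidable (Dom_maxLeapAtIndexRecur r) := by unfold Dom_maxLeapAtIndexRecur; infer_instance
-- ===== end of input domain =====

-- B replaces A's O(n^2) slice-per-call recursion with a single right-to-left pass that
-- carries the current leap index and the value it points at (objective: faster, asymptotic).


-- ===== PORT A =====
-- literal transliteration of A: recursion on the tail (r[1:] = rest for a nonempty list),
-- r[index] via pyGet? (in-range on every input Pre_ admits); Python diverges on [], excluded by Pre_.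
def maxLeapAtIndexRecur : List Int → Int
  | [] => 0
  | a :: rest =>
    if (a :: rest).length = 1 then 0
    else
      let index := maxLeapAtIndexRecur rest + 1
      if a ≥ (PySem.List.pyGet? (a :: rest) index).getD 0 + index then 0 else index

-- ===== PORT B =====
-- Source B's loop 'for v in reversed(r)' with state (x : Option …, g), x = value the current leap points at
def maxLeapAtIndexRecur_alt (r : List Int) : Int :=
  (r.reverse.foldl
    (fun s v =>
      match s with
      | none => some (0, v)
      | some (g, x) => if v ≥ x + g + 1 then some (0, v) else some (g + 1, x))
    (none : Option (Int × Int))).elim 0 Prod.fst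

-- ===== PRECONDITION & SPEC =====
-- Python A recurses on r[1:] forever when r = [], hitting RecursionError; B returns 0 there.
def Pre_maxLeapAtIndexRecur (r : List Int) : Prop := r ≠ []
instance (r : List Int) : Decidable (Pre_maxLeapAtIndexRecur r) := by unfold Pre_maxLeapAtIndexRecur; infer_instance
def pvWitness_maxLeapAtIndexRecur : List Int := [3, 1, 2]

def Spec_maxLeapAtIndexRecur (r : List Int) (out : Int) : Prop := out = maxLeapAtIndexRecur_alt r
instance (r : List Int) (out : Int) : Decidable (Spec_maxLeapAtIndexRecur r out) := by unfold Spec_maxLeapAtIndexRecur; infer_instance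

-- ===== CLAIM (what is proved, stated in full; the proofs are below) =====
def Claim_equal_maxLeapAtIndexRecur : Prop := ∀ (r : List Int), Dom_maxLeapAtIndexRecur r → Pre_maxLeapAtIndexRecur r → Spec_maxLeapAtIndexRecur r (maxLeapAtIndexRecur r)

-- ===== LEMMAS AND PROOFS =====

def pvStep (s : Option (Int × Int)) (v : Int) : Option (Int × Int) :=
  match s with
  | none => some (0, v)
  | some (g, x) => if v ≥ x + g + 1 then some (0, v) else some (g + 1, x)

theorem alt_eq_foldl (r : List Int) :
    maxLeapAtIndexRecur_alt r = (r.reverse.foldl pvStep none).elim 0 Prod.fst := rfl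

theorem foldl_reverse_cons (a : Int) (r : List Int) :
    ((a :: r).reverse.foldl pvStep (none : Option (Int × Int)))
      = pvStep (r.reverse.foldl pvStep none) a := by
  simp [List.reverse_cons, List.foldl_append]

-- Invariant: on a nonempty list the fold state is 'some (g, x)' where g is A's result
-- and x is the element g positions in (the value A's comparison reads).
theorem fold_invariant (r : List Int) (h : r ≠ []) :
    ∃ g x, r.reverse.foldl pvStep (none : Option (Int × Int)) = some (g, x)
      ∧ maxLeapAtIndexRecur r = g ∧ 0 ≤ g ∧ g < r.length
      ∧ r[g.toNat]? = some x := by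
  induction r with
  | nil => exact absurd rfl h
  | cons a rest ih =>
    cases rest with
    | nil =>
      exact ⟨0, a, by simp [pvStep], by simp [maxLeapAtIndexRecur], le_refl 0, by simp, by simp⟩
    | cons b rs =>
      obtain ⟨g, x, hfold, hA, hg0, hglen, hget⟩ := ih (by simp)
      have hgetr : PySem.List.pyGet? (a :: b :: rs) (g + 1) = some x := by
        rw [PySem.List.pyGet?_of_nonneg (h := by omega)]
        have h2 : (g + 1).toNat = g.toNat + 1 := by omega
        rw [h2]
        simpa using hget
      have hstep : (a :: b :: rs).reverse.foldl pvStep (none : Option (Int × Int))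
          = pvStep (some (g, x)) a := by rw [foldl_reverse_cons, hfold]
      by_cases hc : a ≥ x + g + 1
      · refine ⟨0, a, ?_, ?_, le_refl 0, by simp; omega, by simp⟩
        · rw [hstep]; simp [pvStep, hc]
        · rw [maxLeapAtIndexRecur.eq_2, if_neg (by simp)]
          simp only [hA, hgetr, Option.getD_some]
          split_ifs with hif
          · rfl
          · exact absurd hc (by omega)
      · refine ⟨g + 1, x, ?_, ?_, by omega, ?_, ?_⟩
        · rw [hstep]; simp [pvStep, hc]
        · rw [maxLeapAtIndexRecur.eq_2, if_neg (by simp)]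
          simp only [hA, hgetr, Option.getD_some]
          split_ifs with hif
          · exact absurd (by omega : a ≥ x + g + 1) hc
          · rfl
        · simp at hglen ⊢; omega
        · have h2 : (g + 1).toNat = g.toNat + 1 := by omega
          rw [h2]
          simpa using hget

-- ===== VERDICT (by name: the statement is the Claim_ definition above) =====
theorem maxLeapAtIndexRecur_spec : Claim_equal_maxLeapAtIndexRecur := by
  intro r _ hpre
  obtain ⟨g, x, hfold, hA, _⟩ := fold_invariant r hpre
  show maxLeapAtIndexRecur r = maxLeapAtIndexRecur_alt r
  rw [hA, alt_eq_foldl, hfold]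
  rfl
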